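-- pv_equiv track=rewrite | github.com/kklmn/ParSeq | parseq/core/commons.py | intervals_extract
-- ===== SOURCE A (Python) =====
-- import itertools
--
-- def intervals_extract(iterable):
--     iterable = sorted(set(iterable))
--     try:
--         for key, gr in itertools.groupby(
--                 enumerate(iterable), lambda t: int(t[1])-int(t[0])):
--             gr = list(gr)
--             yield [gr[0][1], gr[-1][1]]
--     except ValueError:
--         return iterable
-- ===== SOURCE B (Python) =====
-- def intervals_extract(iterable):
--     data = sorted(set(iterable))
--     if not data:
--         return
--     start = prev = data[0]
--     for v in data[1:]:
--         try:
--             consecutive = int(v) == int(prev) + 1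
--         except ValueError:
--             return
--         if consecutive:
--             prev = v
--         else:
--             yield [start, prev]
--             start = prev = v
--     yield [start, prev]
-- ===== Notes on version B (the rewrite author's own statement) =====
-- stated objective: simpler
-- what changed: Replaced itertools.groupby over enumerate with an index-difference key by a plain single-pass loop keeping start/prev of the current consecutive run.
import Mathlib
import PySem

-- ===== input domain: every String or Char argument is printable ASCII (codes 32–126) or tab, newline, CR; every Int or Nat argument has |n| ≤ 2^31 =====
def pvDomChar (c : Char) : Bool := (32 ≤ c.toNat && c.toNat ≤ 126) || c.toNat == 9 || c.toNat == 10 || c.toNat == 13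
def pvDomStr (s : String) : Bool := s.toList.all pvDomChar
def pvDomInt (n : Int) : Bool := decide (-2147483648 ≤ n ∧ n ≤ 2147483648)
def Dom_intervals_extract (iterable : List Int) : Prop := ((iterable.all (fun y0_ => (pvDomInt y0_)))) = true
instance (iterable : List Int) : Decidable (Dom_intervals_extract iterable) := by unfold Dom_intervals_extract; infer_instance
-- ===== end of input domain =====

-- B replaces itertools.groupby with an index-difference key by a plain start/prev loop; same cost, simpler.
-- A is a generator; the ports return the list of all yielded intervals.

-- ===== PORT A =====
-- itertools.groupby(pairs, key = fun t => t.2 - t.1): consecutive elements stay in one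
-- group while the running key is unchanged (here keys are a pure function of the element,
-- so this adjacent-key recursion is exact).
def pvGbAux (k : Int) (acc : List (Int × Int)) : List (Int × Int) → List (List (Int × Int))
  | [] => [acc.reverse]
  | x :: xs =>
    if x.2 - x.1 = k then pvGbAux (x.2 - x.1) (x :: acc) xs
    else acc.reverse :: pvGbAux (x.2 - x.1) [x] xs

def pvGroupby : List (Int × Int) → List (List (Int × Int))
  | [] => []
  | x :: xs => pvGbAux (x.2 - x.1) [x] xs

def intervals_extract (iterable : List Int) : List (List Int) :=
  let data := PySem.List.sorted (PySem.Set.ofList iterable) (fun x => x) false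
  (pvGroupby (PySem.List.enumerate data 0)).map
    (fun gr => [(gr.headD (0, 0)).2, (gr.getLastD (0, 0)).2])  -- gr[0][1], gr[-1][1]; groups are nonempty

-- ===== PORT B =====
def pvAltLoop (start prev : Int) : List Int → List (List Int)
  | [] => [[start, prev]]
  | v :: rest =>
    if v = prev + 1 then pvAltLoop start v rest
    else [start, prev] :: pvAltLoop v v rest

def intervals_extract_alt (iterable : List Int) : List (List Int) :=
  match PySem.List.sorted (PySem.Set.ofList iterable) (fun x => x) false with
  | [] => []
  | d :: ds => pvAltLoop d d ds

-- ===== PRECONDITION & SPEC =====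
def Spec_intervals_extract (iterable : List Int) (out : List (List Int)) : Prop := out = intervals_extract_alt iterable
instance (iterable : List Int) (out : List (List Int)) : Decidable (Spec_intervals_extract iterable out) := by unfold Spec_intervals_extract; infer_instance

-- ===== CLAIM (what is proved, stated in full; the proofs are below) =====
def Claim_equal_intervals_extract : Prop := ∀ (iterable : List Int), Dom_intervals_extract iterable → Spec_intervals_extract iterable (intervals_extract iterable)

-- ===== LEMMAS AND PROOFS =====

def pvF (gr : List (Int × Int)) : List Int := [(gr.headD (0, 0)).2, (gr.getLastD (0, 0)).2]

theorem pvF_reverse (a : Int × Int) (acc : List (Int × Int))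
    (hh : acc.head? = some a) (s : Int) (hl : (acc.getLast?.map Prod.snd) = some s) :
    pvF acc.reverse = [s, a.2] := by
  cases acc with
  | nil => simp at hh
  | cons x xs =>
    simp only [List.head?_cons, Option.some.injEq] at hh
    subst hh
    have h1 : (x :: xs).reverse.head? = (x :: xs).getLast? := List.head?_reverse
    have h2 : (x :: xs).reverse.getLast? = some x := by
      rw [List.getLast?_reverse]; rfl
    obtain ⟨b, hb⟩ : ∃ b, (x :: xs).getLast? = some b := by
      cases h : (x :: xs).getLast? with
      | none => simp [h] at hl
      | some b => exact ⟨b, rfl⟩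
    have hs : b.2 = s := by simp [hb] at hl; exact hl
    cases hr : (x :: xs).reverse with
    | nil => simp at hr
    | cons y ys =>
      have hy : y = b := by
        have := h1; rw [hr, hb] at this; simpa using this
      have hlast : (y :: ys).getLast? = some x := by rw [← hr]; exact h2
      subst hy
      simp [pvF, List.getLastD_eq_getLast?, hlast, hs]

theorem pvMain (xs : List Int) : ∀ (i s p : Int) (acc : List (Int × Int)),
    acc.head? = some (i - 1, p) → (acc.getLast?.map Prod.snd) = some s →
    (pvGbAux (p - (i - 1)) acc (PySem.List.enumerate xs i)).map pvF = pvAltLoop s p xs := by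
  induction xs with
  | nil =>
    intro i s p acc hh hl
    simp only [PySem.List.enumerate_nil, pvGbAux, List.map, pvAltLoop]
    rw [pvF_reverse _ _ hh _ hl]
  | cons v rest ih =>
    intro i s p acc hh hl
    rw [PySem.List.enumerate_cons]
    simp only [pvGbAux]
    by_cases hc : v = p + 1
    · have hkey : ((i, v).2 - (i, v).1 = p - (i - 1)) := by simp; omega
      rw [if_pos hkey]
      have hacc : acc ≠ [] := by intro h; simp [h] at hh
      have hh' : ((i, v) :: acc).head? = some ((i + 1) - 1, v) := by simp
      have hl' : (((i, v) :: acc).getLast?.map Prod.snd) = some s := by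
        cases acc with
        | nil => exact absurd rfl hacc
        | cons b bs => rw [List.getLast?_cons_cons]; exact hl
      have hrec := ih (i + 1) s v ((i, v) :: acc) hh' hl'
      have hk : (i, v).2 - (i, v).1 = v - (i + 1 - 1) := by simp
      rw [hk, hrec]
      simp [pvAltLoop, hc]
    · have hkey : ¬ ((i, v).2 - (i, v).1 = p - (i - 1)) := by simp; omega
      rw [if_neg hkey]
      have hh' : (((i, v) :: []) : List (Int × Int)).head? = some ((i + 1) - 1, v) := by simp
      have hl' : (([(i, v)] : List (Int × Int)).getLast?.map Prod.snd) = some v := by simp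
      have hrec := ih (i + 1) v v [(i, v)] hh' hl'
      have hk : (i, v).2 - (i, v).1 = v - (i + 1 - 1) := by simp
      simp only [List.map]
      rw [pvF_reverse _ _ hh _ hl, hk, hrec]
      simp [pvAltLoop, hc]

-- ===== VERDICT (by name: the statement is the Claim_ definition above) =====
theorem intervals_extract_spec : Claim_equal_intervals_extract := by
  intro iterable _
  unfold Spec_intervals_extract intervals_extract intervals_extract_alt
  cases h : PySem.List.sorted (PySem.Set.ofList iterable) (fun x => x) false with
  | nil => simp [PySem.List.enumerate_nil, pvGroupby]
  | cons d ds =>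
    simp only [PySem.List.enumerate_cons, pvGroupby]
    have hh : ([((0 : Int), d)] : List (Int × Int)).head? = some (1 - 1, d) := by simp
    have hl : (([((0 : Int), d)] : List (Int × Int)).getLast?.map Prod.snd) = some d := by simp
    have := pvMain ds 1 d d [(0, d)] hh hl
    have hk : d - (0 : Int) = d - (1 - 1) := by ring_nf
    rw [hk]
    exact this
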